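-- pv_equiv track=rewrite | github.com/saumyaojha1407/ds_algo | array/max_sub_array_equal_1_0.py | find_max_sub_array_brute
-- ===== SOURCE A (Python) =====
-- def sub_array(idx, arr):
--     left, right = idx, None
--     max_arr = 0
--     count_0, count_1 = 0, 0
--     while left >=0:
--         if arr[left] == 0:
--             count_0 +=1
--         else:
--             count_1 +=1
--         if count_0 == count_1 and count_0+count_1>max_arr:
--             max_arr = count_0 + count_1
--             right = left
--         left -=1
--     return max_arr, right
--
-- def find_max_sub_array_brute(arr):
--     max_array = 0
--     start = None
--     end = None
--     for i in range(len(arr)):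
--         local_max, start_coord = sub_array(i, arr)
--         if start_coord and local_max > max_array:
--             max_array = local_max
--             start = start_coord
--             end = i
--
--     return start, end
-- ===== SOURCE B (Python) =====
-- def find_max_sub_array_brute(arr):
--     # Prefix-sum (+1 for 0, -1 for nonzero) with a hashmap of the first index
--     # at which each prefix sum occurs: the longest balanced window ending at i
--     # is found in O(1), giving O(n) overall.
--     first = {0: -1}
--     s = 0
--     best_len = 0
--     start = end = None
--     for i, v in enumerate(arr):
--         s += 1 if v == 0 else -1
--         if s in first:
--             j = first[s]
--             if i - j > best_len:
--                 best_len = i - j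
--                 start, end = j + 1, i
--         else:
--             first[s] = i
--     return start, end
-- ===== Notes on version B (the rewrite author's own statement) =====
-- stated objective: faster
-- what changed: Replaced A's per-index backward rescan (sub_array called for every i, each counting 0s/1s over the whole prefix) by a single forward pass that keeps a running prefix sum (+1 for 0, -1 for nonzero) and a hashmap of the first index at which each sum occurs, with the same strict-improvement selection rule.
-- intended difference: On arrays whose unique longest balanced (equal count of 0s and nonzeros) subarray starts at index 0 (taking the first such end on length ties), A's truthiness test 'if start_coord' treats start index 0 as false and so returns the best later-starting window or (None, None), while B returns that longest window (0, e), which is the intended answer. — e.g. on find_max_sub_array_brute([0, 1]): A returns (none, none), B returns (some 0, some 1)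
import Mathlib
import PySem

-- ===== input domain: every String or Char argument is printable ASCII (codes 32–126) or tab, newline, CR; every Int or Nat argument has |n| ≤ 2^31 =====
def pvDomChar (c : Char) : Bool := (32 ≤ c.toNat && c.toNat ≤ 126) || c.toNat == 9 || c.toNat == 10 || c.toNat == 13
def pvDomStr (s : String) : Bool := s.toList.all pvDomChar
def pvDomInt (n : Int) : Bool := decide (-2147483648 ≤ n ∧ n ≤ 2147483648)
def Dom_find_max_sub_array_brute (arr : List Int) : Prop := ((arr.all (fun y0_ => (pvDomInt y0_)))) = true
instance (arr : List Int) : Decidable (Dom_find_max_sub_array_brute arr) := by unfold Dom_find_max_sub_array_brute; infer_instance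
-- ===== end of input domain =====

-- B replaces A's quadratic per-index backward rescans by one forward pass keeping the first
-- index of each prefix sum in a dict (0 counted +1, nonzero -1); same selection rule.

-- ===== PORT A =====
-- inner while-loop of sub_array: left runs k-1, k-2, …, 0
def saLoop (arr : List Int) : Nat → Int → Int → Int → Option Nat → Int × Option Nat
  | 0, _c0, _c1, m, r => (m, r)
  | l+1, c0, c1, m, r =>
    let v := arr.getD l 0
    let c0' := if v = 0 then c0 + 1 else c0
    let c1' := if v = 0 then c1 else c1 + 1
    if c0' = c1' ∧ c0' + c1' > m then saLoop arr l c0' c1' (c0' + c1') (some l)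
    else saLoop arr l c0' c1' m r

def sub_array (idx : Nat) (arr : List Int) : Int × Option Nat := saLoop arr (idx + 1) 0 0 0 none

-- loop body of find_max_sub_array_brute: 'if start_coord and local_max > max_array'
def fmStepA (arr : List Int) (s : Int × Option Int × Option Int) (i : Nat) :
    Int × Option Int × Option Int :=
  let res := sub_array i arr
  match res.2 with
  | some r => if r ≠ 0 ∧ res.1 > s.1 then (res.1, some (r : Int), some (i : Int)) else s
  | none => s

def find_max_sub_array_brute (arr : List Int) : Option Int × Option Int :=
  let st := (List.range arr.length).foldl (fmStepA arr) (0, none, none)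
  (st.2.1, st.2.2)

-- ===== PORT B =====
-- loop body of B: running prefix sum s, dict 'first' of first index per sum, running best
def fmStepB (st : PySem.Dict Int Int × Int × Int × Option Int × Option Int) (iv : Int × Int) :
    PySem.Dict Int Int × Int × Int × Option Int × Option Int :=
  let s' := st.2.1 + (if iv.2 = 0 then 1 else -1)
  match st.1.get? s' with
  | some j =>
      if iv.1 - j > st.2.2.1 then (st.1, s', iv.1 - j, some (j + 1), some iv.1)
      else (st.1, s', st.2.2.1, st.2.2.2.1, st.2.2.2.2)
  | none => (st.1.insert s' iv.1, s', st.2.2.1, st.2.2.2.1, st.2.2.2.2)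

def find_max_sub_array_brute_alt (arr : List Int) : Option Int × Option Int :=
  let st := (PySem.List.enumerate arr).foldl fmStepB
    ((PySem.Dict.empty).insert 0 (-1), 0, 0, none, none)
  (st.2.2.2.1, st.2.2.2.2)

-- ===== PRECONDITION & SPEC =====
-- half-open window arr[j:k] holds as many zeros as nonzeros
abbrev pvz (arr : List Int) (j k : Nat) : Prop :=
  2 * ((arr.take k).drop j).count 0 = k - j

-- On arrays whose unique longest balanced (equal 0s and nonzeros) subarray starts at index 0
-- (first such end if ties in length), A's truthiness test 'if start_coord' treats start 0 as
-- false and returns the best later-starting window or (None, None), while B returns that longest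
-- window (some 0, some e), which is the intended answer.
def D_find_max_sub_array_brute (arr : List Int) : Prop :=
  ∃ e < arr.length, pvz arr 0 (e + 1) ∧
    ∀ k ≤ arr.length, ∀ j < k, pvz arr j k → k - j ≤ e + if e < k then 1 else 0

instance (arr : List Int) : Decidable (D_find_max_sub_array_brute arr) := by
  unfold D_find_max_sub_array_brute; infer_instance

def Spec_find_max_sub_array_brute (arr : List Int) (out : Option Int × Option Int) : Prop :=
  ¬ D_find_max_sub_array_brute arr → out = find_max_sub_array_brute_alt arr
instance (arr : List Int) (out : Option Int × Option Int) :
    Decidable (Spec_find_max_sub_array_brute arr out) := by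
  unfold Spec_find_max_sub_array_brute; infer_instance

def pvDiffWitness_find_max_sub_array_brute : List Int := [0, 1]
def pvDiffWitnessOut_find_max_sub_array_brute :
    (Option Int × Option Int) × (Option Int × Option Int) :=
  ((none, none), (some 0, some 1))

-- ===== CLAIM (what is proved, stated in full; the proofs are below) =====
def Claim_unchanged_find_max_sub_array_brute : Prop :=
  ∀ (arr : List Int), Dom_find_max_sub_array_brute arr →
    Spec_find_max_sub_array_brute arr (find_max_sub_array_brute arr)
def Claim_changed_find_max_sub_array_brute : Prop :=
  Dom_find_max_sub_array_brute (pvDiffWitness_find_max_sub_array_brute) ∧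
  D_find_max_sub_array_brute (pvDiffWitness_find_max_sub_array_brute) ∧
  find_max_sub_array_brute (pvDiffWitness_find_max_sub_array_brute) =
    pvDiffWitnessOut_find_max_sub_array_brute.1 ∧
  find_max_sub_array_brute_alt (pvDiffWitness_find_max_sub_array_brute) =
    pvDiffWitnessOut_find_max_sub_array_brute.2 ∧
  pvDiffWitnessOut_find_max_sub_array_brute.1 ≠ pvDiffWitnessOut_find_max_sub_array_brute.2
def Claim_exact_find_max_sub_array_brute : Prop :=
  ∀ (arr : List Int), Dom_find_max_sub_array_brute arr →
    D_find_max_sub_array_brute arr →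
    find_max_sub_array_brute arr ≠ find_max_sub_array_brute_alt arr

-- ===== LEMMAS AND PROOFS =====

-- sign convention: a zero counts +1, a nonzero -1; pvP arr k is the prefix sum over arr[:k]
def pvSgn (v : Int) : Int := if v = 0 then 1 else -1
def pvP (arr : List Int) (k : Nat) : Int := ((arr.take k).map pvSgn).sum

-- least l < m with p l
def pvLeast (p : Nat → Bool) : Nat → Option Nat
  | 0 => none
  | m + 1 =>
    match pvLeast p m with
    | some l => some l
    | none => if p m then some m else none

-- leftmost start of a balanced window ending at e
def pvF (arr : List Int) (e : Nat) : Option Nat :=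
  pvLeast (fun l => pvP arr l == pvP arr (e + 1)) (e + 1)

def candLen (arr : List Int) (e : Nat) : Int :=
  match pvF arr e with
  | some l => (e : Int) + 1 - l
  | none => 0

-- abstract selection made by A's outer loop (skips start-0 candidates)
def selA (arr : List Int) : Nat → Int × Option Int × Option Int
  | 0 => (0, none, none)
  | i + 1 =>
    match pvF arr i with
    | some l =>
        if l ≠ 0 ∧ (i : Int) + 1 - (l : Int) > (selA arr i).1
        then ((i : Int) + 1 - l, some (l : Int), some (i : Int)) else selA arr i
    | none => selA arr i

-- abstract selection made by B's loop
def selB (arr : List Int) : Nat → Int × Option Int × Option Int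
  | 0 => (0, none, none)
  | i + 1 =>
    match pvF arr i with
    | some l =>
        if (i : Int) + 1 - (l : Int) > (selB arr i).1
        then ((i : Int) + 1 - l, some (l : Int), some (i : Int)) else selB arr i
    | none => selB arr i

lemma pvLeast_eq_none {p : Nat → Bool} {m : Nat} :
    pvLeast p m = none ↔ ∀ j < m, p j = false := by
  induction m with
  | zero => simp [pvLeast]
  | succ m ih =>
    unfold pvLeast
    rcases h : pvLeast p m with _ | l' <;> simp only []
    · rw [h] at ih
      simp only [true_iff] at ih
      constructor
      · intro hc
        split_ifs at hc with hp
        intro j hj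
        rcases Nat.lt_succ_iff_lt_or_eq.mp hj with hj | rfl
        · exact ih j hj
        · simpa using hp
      · intro hall
        simp [hall m (Nat.lt_succ_self m)]
    · constructor
      · intro hc; cases hc
      · intro hall
        have := ih.mpr (fun j hj => hall j (Nat.lt_succ_of_lt hj))
        rw [h] at this; cases this

lemma pvLeast_eq_some {p : Nat → Bool} {m l : Nat} :
    pvLeast p m = some l ↔ l < m ∧ p l = true ∧ ∀ j < l, p j = false := by
  induction m generalizing l with
  | zero => simp [pvLeast]
  | succ m ih =>
    unfold pvLeast
    rcases h : pvLeast p m with _ | l' <;> simp only []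
    · have hall := pvLeast_eq_none.mp h
      constructor
      · intro hc
        split_ifs at hc with hp
        · injection hc with hc
          subst hc
          exact ⟨Nat.lt_succ_self _, hp, hall⟩
      · rintro ⟨hlm, hpl, _⟩
        have hlem : l = m := by
          rcases Nat.lt_succ_iff_lt_or_eq.mp hlm with h' | h'
          · exact absurd hpl (by simp [hall l h'])
          · exact h'
        subst hlem
        simp [hpl]
    · have hs := ih.mp h
      constructor
      · rintro hc
        injection hc with hc
        subst hc
        exact ⟨Nat.lt_succ_of_lt hs.1, hs.2.1, hs.2.2⟩
      · rintro ⟨hlm, hpl, hless⟩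
        have : l' = l := by
          rcases Nat.lt_trichotomy l' l with h' | h' | h'
          · exact absurd hs.2.1 (by simp [hless l' h'])
          · exact h'
          · exact absurd hpl (by simp [hs.2.2 l h'])
        simp [this]

lemma pvLeast_some_le {p : Nat → Bool} {m j : Nat} (hj : j < m) (hp : p j = true) :
    ∃ l, pvLeast p m = some l ∧ l ≤ j := by
  rcases h : pvLeast p m with _ | l
  · exact absurd hp (by simp [pvLeast_eq_none.mp h j hj])
  · refine ⟨l, rfl, ?_⟩
    by_contra hlt
    exact absurd hp (by simp [(pvLeast_eq_some.mp h).2.2 j (by omega)])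

lemma pvP_succ {arr : List Int} {k : Nat} (h : k < arr.length) :
    pvP arr (k + 1) = pvP arr k + pvSgn (arr.getD k 0) := by
  have hm : k < (arr.map pvSgn).length := by simpa using h
  unfold pvP
  rw [List.map_take, List.map_take, List.take_add_one, List.getElem?_eq_getElem hm]
  simp [List.getD, List.getElem?_eq_getElem h]

lemma pvP_count {arr : List Int} {k : Nat} (h : k ≤ arr.length) :
    pvP arr k = 2 * ((arr.take k).countP (fun v => v == 0) : Int) - k := by
  induction k with
  | zero => simp [pvP]
  | succ k ih =>
    have hk : k < arr.length := h
    rw [pvP_succ hk, ih (le_of_lt hk), List.take_add_one, List.getElem?_eq_getElem hk,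
        List.countP_append]
    simp only [List.getD, List.getElem?_eq_getElem hk, Option.getD_some, pvSgn]
    by_cases hz : arr[k] = 0 <;> simp [hz] <;> omega

def pvBal (arr : List Int) (a b : Nat) : Bool :=
  decide (a ≤ b) && decide (b < arr.length) &&
    (2 * ((arr.drop a).take (b + 1 - a)).countP (fun v => v == 0) == b + 1 - a)

lemma pvBal_eq_pvz {arr : List Int} {a b : Nat} :
    pvBal arr a b = true ↔ a ≤ b ∧ b < arr.length ∧ pvz arr a (b + 1) := by
  unfold pvBal pvz
  rw [List.count_eq_countP, List.drop_take]
  simp [Bool.and_eq_true, and_assoc]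

lemma pvBal_iff {arr : List Int} {a b : Nat} :
    pvBal arr a b = true ↔ a ≤ b ∧ b < arr.length ∧ pvP arr a = pvP arr (b + 1) := by
  unfold pvBal
  simp only [Bool.and_eq_true, decide_eq_true_eq, beq_iff_eq]
  constructor
  · rintro ⟨⟨hab, hb⟩, hc⟩
    refine ⟨hab, hb, ?_⟩
    have h1 : arr.take (b + 1) = arr.take a ++ (arr.drop a).take (b + 1 - a) := by
      rw [← List.take_add]
      congr 1
      omega
    have h2 := pvP_count (arr := arr) (k := b + 1) (by omega)
    have h3 := pvP_count (arr := arr) (k := a) (by omega)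
    rw [h1, List.countP_append] at h2
    omega
  · rintro ⟨hab, hb, hP⟩
    refine ⟨⟨hab, hb⟩, ?_⟩
    have h1 : arr.take (b + 1) = arr.take a ++ (arr.drop a).take (b + 1 - a) := by
      rw [← List.take_add]
      congr 1
      omega
    have h2 := pvP_count (arr := arr) (k := b + 1) (by omega)
    have h3 := pvP_count (arr := arr) (k := a) (by omega)
    rw [h1, List.countP_append] at h2
    omega

lemma pvF_some {arr : List Int} {e l : Nat} (h : pvF arr e = some l) :
    l ≤ e ∧ pvP arr l = pvP arr (e + 1) := by
  have := pvLeast_eq_some.mp h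
  refine ⟨by omega, by simpa using this.2.1⟩

lemma pvF_le {arr : List Int} {e a : Nat} (ha : a ≤ e) (hp : pvP arr a = pvP arr (e + 1)) :
    ∃ l, pvF arr e = some l ∧ l ≤ a := by
  exact pvLeast_some_le (by omega) (by simpa using hp)

lemma candLen_ge {arr : List Int} {a b : Nat} (h : pvBal arr a b = true) :
    (b : Int) + 1 - a ≤ candLen arr b := by
  rcases pvBal_iff.mp h with ⟨hab, _, hp⟩
  rcases pvF_le hab hp with ⟨l, hf, hla⟩
  have hc : candLen arr b = (b : Int) + 1 - l := by simp [candLen, hf]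
  have : (l : Int) ≤ a := by exact_mod_cast hla
  omega

lemma pvLeast_succ (p : Nat → Bool) (m : Nat) :
    pvLeast p (m + 1) =
      match pvLeast p m with
      | some l => some l
      | none => if p m then some m else none := rfl

lemma saLoop_spec (arr : List Int) (T S : Int) :
    ∀ (k : Nat) (c0 c1 m : Int) (r : Option Nat), k ≤ arr.length →
      c0 - c1 = T - pvP arr k → c0 + c1 = S - k → m ≤ c0 + c1 →
      saLoop arr k c0 c1 m r =
        match pvLeast (fun l => pvP arr l == T) k with
        | some l => (S - l, some l)
        | none => (m, r) := by
  intro k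
  induction k with
  | zero =>
    intro c0 c1 m r _ _ _ _
    simp [saLoop, pvLeast]
  | succ k ih =>
    intro c0 c1 m r hk hd hs hm
    have hkl : k < arr.length := hk
    have hP := pvP_succ (arr := arr) (k := k) hkl
    rw [hP] at hd
    unfold saLoop
    simp only []
    push_cast at hs
    rw [pvLeast_succ]
    by_cases hz : arr.getD k 0 = 0
    · rw [if_pos hz, if_pos hz]
      simp only [pvSgn] at hd
      rw [if_pos hz] at hd
      by_cases hb : (c0 + 1 : Int) = c1
      · have hT : pvP arr k = T := by omega
        rw [if_pos ⟨hb, by omega⟩]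
        rw [ih (c0 + 1) c1 (c0 + 1 + c1) (some k) (le_of_lt hkl) (by omega) (by omega) (by omega)]
        rcases hL : pvLeast (fun l => pvP arr l == T) k with _ | l
        · have hv : c0 + 1 + c1 = S - (k : Int) := by omega
          simp [hT, hv]
        · simp
      · rw [if_neg (by intro hcon; exact hb hcon.1)]
        rw [ih (c0 + 1) c1 m r (le_of_lt hkl) (by omega) (by omega) (by omega)]
        have hT : ¬ (pvP arr k = T) := by omega
        rcases hL : pvLeast (fun l => pvP arr l == T) k with _ | l
        · simp [hT]
        · simp
    · rw [if_neg hz, if_neg hz]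
      simp only [pvSgn] at hd
      rw [if_neg hz] at hd
      by_cases hb : (c0 : Int) = c1 + 1
      · have hT : pvP arr k = T := by omega
        rw [if_pos ⟨hb, by omega⟩]
        rw [ih c0 (c1 + 1) (c0 + (c1 + 1)) (some k) (le_of_lt hkl) (by omega) (by omega) (by omega)]
        rcases hL : pvLeast (fun l => pvP arr l == T) k with _ | l
        · have hv : c0 + (c1 + 1) = S - (k : Int) := by omega
          simp [hT, hv]
        · simp
      · rw [if_neg (by intro hcon; exact hb hcon.1)]
        rw [ih c0 (c1 + 1) m r (le_of_lt hkl) (by omega) (by omega) (by omega)]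
        have hT : ¬ (pvP arr k = T) := by omega
        rcases hL : pvLeast (fun l => pvP arr l == T) k with _ | l
        · simp [hT]
        · simp

lemma selA_succ (arr : List Int) (i : Nat) :
    selA arr (i + 1) =
      match pvF arr i with
      | some l =>
          if l ≠ 0 ∧ (i : Int) + 1 - (l : Int) > (selA arr i).1
          then ((i : Int) + 1 - l, some (l : Int), some (i : Int)) else selA arr i
      | none => selA arr i := rfl

lemma selB_succ (arr : List Int) (i : Nat) :
    selB arr (i + 1) =
      match pvF arr i with
      | some l =>
          if (i : Int) + 1 - (l : Int) > (selB arr i).1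
          then ((i : Int) + 1 - l, some (l : Int), some (i : Int)) else selB arr i
      | none => selB arr i := rfl

lemma sub_array_spec {arr : List Int} {i : Nat} (h : i < arr.length) :
    sub_array i arr =
      match pvF arr i with
      | some l => ((i : Int) + 1 - l, some l)
      | none => (0, none) := by
  unfold sub_array
  rw [saLoop_spec arr (pvP arr (i + 1)) ((i : Int) + 1) (i + 1) 0 0 0 none h
    (by omega) (by push_cast; ring) le_rfl]
  unfold pvF
  rcases pvLeast (fun l => pvP arr l == pvP arr (i + 1)) (i + 1) with _ | l <;> simp

lemma foldA_spec (arr : List Int) :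
    ∀ i, i ≤ arr.length →
      (List.range i).foldl (fmStepA arr) (0, none, none) = selA arr i := by
  intro i
  induction i with
  | zero => intro _; simp [selA]
  | succ i ih =>
    intro hi
    rw [List.range_succ, List.foldl_append, ih (by omega), List.foldl_cons, List.foldl_nil,
        selA_succ]
    unfold fmStepA
    rw [sub_array_spec (by omega)]
    rcases pvF arr i with _ | l <;> simp

lemma portA_eq (arr : List Int) :
    find_max_sub_array_brute arr =
      ((selA arr arr.length).2.1, (selA arr arr.length).2.2) := by
  unfold find_max_sub_array_brute
  rw [foldA_spec arr arr.length le_rfl]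

lemma foldB_spec (arr : List Int) :
    ∀ i, i ≤ arr.length →
      ∃ d : PySem.Dict Int Int,
        (PySem.List.enumerate (arr.take i)).foldl fmStepB
            ((PySem.Dict.empty).insert 0 (-1), 0, 0, none, none) =
          (d, pvP arr i, selB arr i) ∧
        ∀ v : Int, d.get? v =
          (pvLeast (fun k => pvP arr k == v) (i + 1)).map (fun k => (k : Int) - 1) := by
  intro i
  induction i with
  | zero =>
    intro _
    refine ⟨(PySem.Dict.empty).insert 0 (-1), by simp [selB, pvP], ?_⟩
    intro v
    rw [PySem.Dict.get?_insert]
    by_cases hv : v = (0 : Int)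
    · subst hv; simp [pvLeast, pvP]
    · simp only [if_neg hv, PySem.Dict.get?_empty, pvLeast, pvP]
      have : ((0 : Int) == v) = false := by simpa using Ne.symm hv
      simp [this]
  | succ i ih =>
    intro hi
    have hil : i < arr.length := hi
    rcases ih (by omega) with ⟨d, heq, hget⟩
    have hg : arr.getD i 0 = arr[i] := by simp [List.getD, List.getElem?_eq_getElem hil]
    have htake : arr.take (i + 1) = arr.take i ++ [arr[i]] := by
      rw [List.take_add_one, List.getElem?_eq_getElem hil]
      rfl
    have hlen : (arr.take i).length = i := by
      rw [List.length_take]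
      omega
    rw [htake, PySem.List.enumerate_append, List.foldl_append, heq, hlen]
    simp only [PySem.List.enumerate_cons, PySem.List.enumerate_nil, List.foldl_cons,
      List.foldl_nil, zero_add]
    have hP1 : pvP arr i + (if arr[i] = (0 : Int) then (1 : Int) else -1) = pvP arr (i + 1) := by
      rw [pvP_succ hil, hg]
      simp [pvSgn]
    unfold fmStepB
    simp only []
    rw [hP1]
    rcases hF : pvF arr i with _ | l
    · -- no balanced window ending at i: key is new, dict grows
      have hdn : d.get? (pvP arr (i + 1)) = none := by
        rw [hget (pvP arr (i + 1)),
          show pvLeast (fun k => pvP arr k == pvP arr (i + 1)) (i + 1) = pvF arr i from rfl, hF]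
        rfl
      rw [hdn]
      refine ⟨d.insert (pvP arr (i + 1)) (i : Int), ?_, ?_⟩
      · rw [selB_succ, hF]
      · intro v
        rw [PySem.Dict.get?_insert, pvLeast_succ]
        by_cases hv : v = pvP arr (i + 1)
        · subst hv
          rw [show pvLeast (fun k => pvP arr k == pvP arr (i + 1)) (i + 1) = pvF arr i from rfl,
              hF]
          simp
        · rw [if_neg hv, hget v]
          rcases hL : pvLeast (fun k => pvP arr k == v) (i + 1) with _ | l'
          · have : (pvP arr (i + 1) == v) = false := by
              simpa using fun hc => hv (hc.symm)
            simp [this]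
          · simp
    · -- balanced window [l..i]: candidate of length i+1-l
      have hds : d.get? (pvP arr (i + 1)) = some ((l : Int) - 1) := by
        rw [hget (pvP arr (i + 1)),
          show pvLeast (fun k => pvP arr k == pvP arr (i + 1)) (i + 1) = pvF arr i from rfl, hF]
        rfl
      rw [hds]
      have harith : (i : Int) - ((l : Int) - 1) = (i : Int) + 1 - l := by ring
      have harith2 : ((l : Int) - 1) + 1 = (l : Int) := by ring
      refine ⟨d, ?_, ?_⟩
      · rw [selB_succ, hF]
        simp only [harith, harith2]
        split_ifs with hc
        · rfl
        · rfl
      · intro v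
        conv_rhs => rw [pvLeast_succ]
        rcases hL : pvLeast (fun k => pvP arr k == v) (i + 1) with _ | l'
        · have hvne : v ≠ pvP arr (i + 1) := by
            intro hv
            rw [hv, show pvLeast (fun k => pvP arr k == pvP arr (i + 1)) (i + 1) =
                pvF arr i from rfl, hF] at hL
            cases hL
          have hb : (pvP arr (i + 1) == v) = false := by
            simpa using fun hc => hvne hc.symm
          rw [hget v, hL]
          simp [hb]
        · rw [hget v, hL]

lemma portB_eq (arr : List Int) :
    find_max_sub_array_brute_alt arr =
      ((selB arr arr.length).2.1, (selB arr arr.length).2.2) := by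
  rcases foldB_spec arr arr.length le_rfl with ⟨d, heq, -⟩
  rw [List.take_length] at heq
  unfold find_max_sub_array_brute_alt
  rw [heq]

lemma selA_char (arr : List Int) :
    ∀ i, (selA arr i = (0, none, none) ∧
            ∀ e < i, ∀ l, pvF arr e = some l → l = 0) ∨
      ∃ e l, e < i ∧ pvF arr e = some l ∧ l ≠ 0 ∧
        selA arr i = ((e : Int) + 1 - l, some (l : Int), some (e : Int)) ∧
        (∀ e' < i, ∀ l', pvF arr e' = some l' → l' ≠ 0 →
            (e' : Int) + 1 - l' ≤ (e : Int) + 1 - l) ∧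
        (∀ e' < e, ∀ l', pvF arr e' = some l' → l' ≠ 0 →
            (e' : Int) + 1 - l' < (e : Int) + 1 - l) := by
  intro i
  induction i with
  | zero => left; exact ⟨rfl, by omega⟩
  | succ i ih =>
    have hskip : ∀ l, pvF arr i = some l → l = 0 → selA arr (i + 1) = selA arr i := by
      intro l hF hl0
      rw [selA_succ, hF]
      simp [hl0]
    rcases hF : pvF arr i with _ | l
    · have hsel : selA arr (i + 1) = selA arr i := by rw [selA_succ, hF]
      rcases ih with ⟨h0, hall⟩ | ⟨e, l, he, hfe, hl0, hsel', hb1, hb2⟩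
      · left
        refine ⟨by rw [hsel, h0], fun e hei l hfl => ?_⟩
        rcases Nat.lt_succ_iff_lt_or_eq.mp hei with h | rfl
        · exact hall e h l hfl
        · rw [hF] at hfl; cases hfl
      · right
        refine ⟨e, l, by omega, hfe, hl0, by rw [hsel, hsel'], fun e' he' l' hfl' hne' => ?_, hb2⟩
        rcases Nat.lt_succ_iff_lt_or_eq.mp he' with h | rfl
        · exact hb1 e' h l' hfl' hne'
        · rw [hF] at hfl'; cases hfl'
    · by_cases hl0 : l = 0
      · subst hl0
        have hsel : selA arr (i + 1) = selA arr i := hskip 0 hF rfl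
        rcases ih with ⟨h0, hall⟩ | ⟨e, l, he, hfe, hlne, hsel', hb1, hb2⟩
        · left
          refine ⟨by rw [hsel, h0], fun e hei l' hfl => ?_⟩
          rcases Nat.lt_succ_iff_lt_or_eq.mp hei with h | rfl
          · exact hall e h l' hfl
          · rw [hF] at hfl; injection hfl with h'; omega
        · right
          refine ⟨e, l, by omega, hfe, hlne, by rw [hsel, hsel'],
            fun e' he' l' hfl' hne' => ?_, hb2⟩
          rcases Nat.lt_succ_iff_lt_or_eq.mp he' with h | rfl
          · exact hb1 e' h l' hfl' hne'
          · rw [hF] at hfl'; injection hfl' with h'; omega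
      · have hle : (l : Int) ≤ i := by exact_mod_cast (pvF_some hF).1
        have hsel : selA arr (i + 1) =
            if l ≠ 0 ∧ (i : Int) + 1 - (l : Int) > (selA arr i).1
            then ((i : Int) + 1 - l, some (l : Int), some (i : Int)) else selA arr i := by
          rw [selA_succ, hF]
        rcases ih with ⟨h0, hall⟩ | ⟨e0, l0, he0, hf0, hl0', hsel0, hb1, hb2⟩
        · have hcond : l ≠ 0 ∧ (i : Int) + 1 - (l : Int) > (selA arr i).1 := by
            rw [h0]; exact ⟨hl0, by dsimp; omega⟩
          right
          refine ⟨i, l, by omega, hF, hl0, by rw [hsel, if_pos hcond],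
            fun e' he' l' hfl' hne' => ?_, fun e' he' l' hfl' hne' => ?_⟩
          · rcases Nat.lt_succ_iff_lt_or_eq.mp he' with h | rfl
            · exact absurd (hall e' h l' hfl') hne'
            · rw [hF] at hfl'; injection hfl' with h'; omega
          · exact absurd (hall e' he' l' hfl') hne'
        · have h1 : (selA arr i).1 = (e0 : Int) + 1 - l0 := by rw [hsel0]
          by_cases hcond : (i : Int) + 1 - (l : Int) > (e0 : Int) + 1 - (l0 : Int)
          · right
            refine ⟨i, l, by omega, hF, hl0,
              by rw [hsel, if_pos ⟨hl0, by rw [h1]; exact hcond⟩],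
              fun e' he' l' hfl' hne' => ?_, fun e' he' l' hfl' hne' => ?_⟩
            · rcases Nat.lt_succ_iff_lt_or_eq.mp he' with h | rfl
              · have := hb1 e' h l' hfl' hne'; omega
              · rw [hF] at hfl'; injection hfl' with h'; subst h'; omega
            · have := hb1 e' he' l' hfl' hne'; omega
          · right
            have hnc : ¬ (l ≠ 0 ∧ (i : Int) + 1 - (l : Int) > (selA arr i).1) := by
              rw [h1]; exact fun hc => hcond hc.2
            refine ⟨e0, l0, by omega, hf0, hl0', by rw [hsel, if_neg hnc, hsel0],
              fun e' he' l' hfl' hne' => ?_, hb2⟩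
            rcases Nat.lt_succ_iff_lt_or_eq.mp he' with h | rfl
            · exact hb1 e' h l' hfl' hne'
            · rw [hF] at hfl'; injection hfl' with h'; subst h'; omega

lemma selB_char (arr : List Int) :
    ∀ i, (selB arr i = (0, none, none) ∧ ∀ e < i, pvF arr e = none) ∨
      ∃ e l, e < i ∧ pvF arr e = some l ∧
        selB arr i = ((e : Int) + 1 - l, some (l : Int), some (e : Int)) ∧
        (∀ e' < i, candLen arr e' ≤ (e : Int) + 1 - l) ∧
        (∀ e' < e, candLen arr e' < (e : Int) + 1 - l) := by
  intro i
  induction i with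
  | zero => left; exact ⟨rfl, by omega⟩
  | succ i ih =>
    rcases hF : pvF arr i with _ | l
    · have hsel : selB arr (i + 1) = selB arr i := by rw [selB_succ, hF]
      have hci : candLen arr i = 0 := by simp [candLen, hF]
      rcases ih with ⟨h0, hall⟩ | ⟨e, l, he, hfe, hsel', hb1, hb2⟩
      · left
        refine ⟨by rw [hsel, h0], fun e hei => ?_⟩
        rcases Nat.lt_succ_iff_lt_or_eq.mp hei with h | rfl
        · exact hall e h
        · exact hF
      · right
        have hle : (l : Int) ≤ e := by exact_mod_cast (pvF_some hfe).1
        refine ⟨e, l, by omega, hfe, by rw [hsel, hsel'], fun e' he' => ?_, hb2⟩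
        rcases Nat.lt_succ_iff_lt_or_eq.mp he' with h | rfl
        · exact hb1 e' h
        · rw [hci]; omega
    · have hle : (l : Int) ≤ i := by exact_mod_cast (pvF_some hF).1
      have hci : candLen arr i = (i : Int) + 1 - l := by simp [candLen, hF]
      have hsel : selB arr (i + 1) =
          if (i : Int) + 1 - (l : Int) > (selB arr i).1
          then ((i : Int) + 1 - l, some (l : Int), some (i : Int)) else selB arr i := by
        rw [selB_succ, hF]
      rcases ih with ⟨h0, hall⟩ | ⟨e0, l0, he0, hf0, hsel0, hb1, hb2⟩
      · have hcond : (i : Int) + 1 - (l : Int) > (selB arr i).1 := by rw [h0]; dsimp; omega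
        right
        refine ⟨i, l, by omega, hF, by rw [hsel, if_pos hcond], fun e' he' => ?_,
          fun e' he' => ?_⟩
        · rcases Nat.lt_succ_iff_lt_or_eq.mp he' with h | rfl
          · simp [candLen, hall e' h]; omega
          · rw [hci]
        · simp [candLen, hall e' he']; omega
      · have h1 : (selB arr i).1 = (e0 : Int) + 1 - l0 := by rw [hsel0]
        by_cases hcond : (i : Int) + 1 - (l : Int) > (e0 : Int) + 1 - (l0 : Int)
        · right
          refine ⟨i, l, by omega, hF, by rw [hsel, h1, if_pos hcond], fun e' he' => ?_,
            fun e' he' => ?_⟩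
          · rcases Nat.lt_succ_iff_lt_or_eq.mp he' with h | rfl
            · have := hb1 e' h; omega
            · rw [hci]
          · have := hb1 e' he'; omega
        · right
          refine ⟨e0, l0, by omega, hf0, by rw [hsel, h1, if_neg hcond, hsel0],
            fun e' he' => ?_, hb2⟩
          rcases Nat.lt_succ_iff_lt_or_eq.mp he' with h | rfl
          · exact hb1 e' h
          · rw [hci]; omega

-- if B's winner starts at 0, the array is in D_
lemma D_iff (arr : List Int) :
    D_find_max_sub_array_brute arr ↔
      ∃ e < arr.length, pvBal arr 0 e = true
        ∧ (∀ b < arr.length, ∀ a ≤ b, pvBal arr a b = true → b - a ≤ e)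
        ∧ (∀ e' < e, ∀ a ≤ e', pvBal arr a e' = true → e' - a < e) := by
  constructor
  · rintro ⟨e, he, h0, hcomb⟩
    refine ⟨e, he, pvBal_eq_pvz.mpr ⟨Nat.zero_le e, he, h0⟩, ?_, ?_⟩
    · intro b hb a hab hbal
      rcases pvBal_eq_pvz.mp hbal with ⟨-, -, hz⟩
      have := hcomb (b + 1) (by omega) a (by omega) hz
      split_ifs at this <;> omega
    · intro e' he' a hae hbal
      rcases pvBal_eq_pvz.mp hbal with ⟨-, -, hz⟩
      have := hcomb (e' + 1) (by omega) a (by omega) hz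
      split_ifs at this <;> omega
  · rintro ⟨e, he, h0, hmax, hfirst⟩
    refine ⟨e, he, (pvBal_eq_pvz.mp h0).2.2, ?_⟩
    intro k hk j hjk hz
    have hk1 : k - 1 + 1 = k := by omega
    have hbal : pvBal arr j (k - 1) = true :=
      pvBal_eq_pvz.mpr ⟨by omega, by omega, by rw [hk1]; exact hz⟩
    split_ifs with hek
    · have := hmax (k - 1) (by omega) j (by omega) hbal
      omega
    · have := hfirst (k - 1) (by omega) j (by omega) hbal
      omega

lemma D_of_selB_zero {arr : List Int} {e : Nat} (he : e < arr.length)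
    (hf : pvF arr e = some 0)
    (hmax : ∀ e' < arr.length, candLen arr e' ≤ (e : Int) + 1)
    (hfirst : ∀ e' < e, candLen arr e' < (e : Int) + 1) :
    D_find_max_sub_array_brute arr := by
  refine (D_iff arr).mpr ⟨e, he, pvBal_iff.mpr ⟨Nat.zero_le e, he, (pvF_some hf).2⟩, ?_, ?_⟩
  · intro b hb a hab hbal
    have h1 := candLen_ge hbal
    have h2 := hmax b hb
    omega
  · intro e' he' a hae hbal
    have h1 := candLen_ge hbal
    have h2 := hfirst e' he'
    omega

-- inside D_, B's winner is exactly the witnessing prefix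
lemma selB_of_D {arr : List Int} (hD : D_find_max_sub_array_brute arr) :
    ∃ e, pvF arr e = some 0 ∧ e < arr.length ∧
      selB arr arr.length = ((e : Int) + 1, some 0, some (e : Int)) := by
  rcases (D_iff arr).mp hD with ⟨e, he, hbal, hmax, hfirst⟩
  have hcl : (e : Int) + 1 ≤ candLen arr e := by
    have := candLen_ge hbal
    simpa using this
  rcases selB_char arr arr.length with ⟨h0, hall⟩ | ⟨e0, l0, he0, hf0, hsel0, hb1, hb2⟩
  · rcases pvBal_iff.mp hbal with ⟨-, -, hp⟩
    rcases pvF_le (Nat.zero_le e) hp with ⟨l, hl, -⟩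
    rw [hall e he] at hl
    cases hl
  · have hl0e0 : l0 ≤ e0 := (pvF_some hf0).1
    have hbal0 : pvBal arr l0 e0 = true :=
      pvBal_iff.mpr ⟨hl0e0, he0, (pvF_some hf0).2⟩
    have hd1 : e0 - l0 ≤ e := hmax e0 he0 l0 hl0e0 hbal0
    have hd2 : candLen arr e ≤ (e0 : Int) + 1 - l0 := hb1 e he
    have hee : e0 = e := by
      rcases Nat.lt_trichotomy e0 e with h | h | h
      · have := hfirst e0 h l0 hl0e0 hbal0
        omega
      · exact h
      · have := hb2 e h
        omega
    subst hee
    have hl00 : l0 = 0 := by omega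
    subst hl00
    refine ⟨e0, hf0, he0, ?_⟩
    rw [hsel0]
    norm_num

-- ===== VERDICT (by name: the statement is the Claim_ definition above) =====
theorem find_max_sub_array_brute_spec : Claim_unchanged_find_max_sub_array_brute := by
  intro arr _ hnD
  rw [portA_eq, portB_eq]
  rcases selB_char arr arr.length with ⟨h0, hall⟩ | ⟨e, l, he, hf, hsel, hb1, hb2⟩
  · rcases selA_char arr arr.length with ⟨h0', _⟩ | ⟨e, l, he, hf, hl0, hsel', hb1', hb2'⟩
    · rw [h0, h0']
    · rw [hall e he] at hf
      cases hf
  · by_cases hl0 : l = 0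
    · subst hl0
      refine absurd (D_of_selB_zero he hf (fun e' h => ?_) (fun e' h => ?_)) hnD
      · have := hb1 e' h; omega
      · have := hb2 e' h; omega
    · rcases selA_char arr arr.length with ⟨h0', hall'⟩ | ⟨e1, l1, he1, hf1, hl1, hsel1, hb1', hb2'⟩
      · exact absurd (hall' e he l hf) hl0
      · have hc1 : candLen arr e1 = (e1 : Int) + 1 - l1 := by simp [candLen, hf1]
        have h1 : (e1 : Int) + 1 - l1 ≤ (e : Int) + 1 - l := by
          have := hb1 e1 he1; omega
        have h2 : (e : Int) + 1 - l ≤ (e1 : Int) + 1 - l1 := hb1' e he l hf hl0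
        have hee : e1 = e := by
          rcases Nat.lt_trichotomy e1 e with h | h | h
          · have := hb2 e1 h; omega
          · exact h
          · have := hb2' e h l hf hl0; omega
        subst hee
        rw [hf] at hf1
        injection hf1 with hll
        subst hll
        rw [hsel, hsel1]

theorem find_max_sub_array_brute_changed : Claim_changed_find_max_sub_array_brute := by
  unfold Claim_changed_find_max_sub_array_brute; decide

theorem find_max_sub_array_brute_tight : Claim_exact_find_max_sub_array_brute := by
  intro arr _ hD
  rcases selB_of_D hD with ⟨e, hf0, he, hselB⟩
  rw [portA_eq, portB_eq, hselB]
  rcases selA_char arr arr.length with ⟨h0', _⟩ | ⟨e1, l1, he1, hf1, hl1, hsel1, _, _⟩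
  · rw [h0']
    simp
  · rw [hsel1]
    simp only [Prod.mk.injEq, ne_eq, not_and]
    intro hc
    exfalso
    apply hl1
    have : (l1 : Int) = 0 := by injection hc
    exact_mod_cast this
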